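-- pv_equiv track=rewrite | github.com/pbrehaut/FW_Forms_pub | data_transform_funcs.py | format_ips
-- ===== SOURCE A (Python) =====
-- from itertools import groupby
-- from operator import itemgetter
--
-- def format_ips(data):
--     # Sort the data by the second element of each tuple
--     sorted_data = sorted(data, key=itemgetter(1))
--
--     # Group the data by the second element
--     result = []
--     for key, group in groupby(sorted_data, key=itemgetter(1)):
--         # Extract first elements, remove duplicates, and sort
--         first_elements = sorted(set(item[0] for item in group))
--
--         # Add the key and first elements to the result
--         result.append(f"Flow: {str(key)}")
--         result.extend([f" -{x}" for x in first_elements])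
--
--     # Join all elements with newline characters
--     return '\n'.join(result)
-- ===== SOURCE B (Python) =====
-- from collections import defaultdict
--
-- def format_ips(data):
--     groups = defaultdict(set)
--     for first, key in data:
--         groups[key].add(first)
--     result = []
--     for key in sorted(groups):
--         result.append(f"Flow: {str(key)}")
--         result.extend(f" -{x}" for x in sorted(groups[key]))
--     return '\n'.join(result)
-- ===== Notes on version B (the rewrite author's own statement) =====
-- stated objective: idiomatic
-- what changed: Replaced sort-the-whole-input-then-itertools.groupby with a single-pass defaultdict(set) grouping keyed by hashing, then iteration over the sorted keys.
import Mathlib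
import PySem

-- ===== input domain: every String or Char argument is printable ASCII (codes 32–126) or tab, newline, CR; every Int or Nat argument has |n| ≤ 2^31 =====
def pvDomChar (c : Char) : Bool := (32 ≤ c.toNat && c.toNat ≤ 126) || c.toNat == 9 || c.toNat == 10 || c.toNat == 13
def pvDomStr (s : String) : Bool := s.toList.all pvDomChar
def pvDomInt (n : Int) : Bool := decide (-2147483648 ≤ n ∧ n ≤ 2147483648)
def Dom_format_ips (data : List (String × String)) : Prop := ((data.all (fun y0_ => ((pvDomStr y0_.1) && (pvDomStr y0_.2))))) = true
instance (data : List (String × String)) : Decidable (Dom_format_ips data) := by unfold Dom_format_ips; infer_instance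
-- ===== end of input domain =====

-- B replaces sort-whole-input + itertools.groupby by a single-pass dict-of-sets grouping
-- followed by iteration over the sorted keys (idiomatic; same return value).

-- ===== PORT A =====
-- itertools.groupby over the key-sorted list: each iteration consumes one maximal run
-- of equal keys (takeWhile/dropWhile), exactly groupby's consecutive grouping.
def pvGroupA : List (String × String) → List String
  | [] => []
  | x :: xs =>
    (("Flow: " ++ x.2) ::
      (PySem.List.sorted (PySem.Set.ofList (((x :: xs).takeWhile (fun it => it.2 == x.2)).map (·.1))) (fun y => y) false).map (fun s => " -" ++ s))
      ++ pvGroupA ((x :: xs).dropWhile (fun it => it.2 == x.2))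
  termination_by l => l.length
  decreasing_by
    simp only [List.dropWhile, beq_self_eq_true, List.length_cons]
    exact Nat.lt_succ_of_le (List.length_dropWhile_le _ _)

def format_ips (data : List (String × String)) : String :=
  PySem.Str.join "\n" (pvGroupA (PySem.List.sorted data (fun it => it.2) false))

-- ===== PORT B =====
def format_ips_alt (data : List (String × String)) : String :=
  let groups : PySem.Dict String (PySem.Set String) :=
    data.foldl (fun d it => d.modify it.2 PySem.Set.empty (fun s => PySem.Set.add s it.1)) PySem.Dict.empty
  let result : List String :=
    (PySem.List.sorted groups.keys (fun k => k) false).foldl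
      (fun res k =>
        (res ++ ["Flow: " ++ k]) ++
          (PySem.List.sorted (groups.getD k PySem.Set.empty) (fun y => y) false).map (fun x => " -" ++ x))
      []
  PySem.Str.join "\n" result

-- ===== PRECONDITION & SPEC =====
def Spec_format_ips (data : List (String × String)) (out : String) : Prop := out = format_ips_alt data
instance (data : List (String × String)) (out : String) : Decidable (Spec_format_ips data out) := by unfold Spec_format_ips; infer_instance

-- ===== CLAIM (what is proved, stated in full; the proofs are below) =====
def Claim_equal_format_ips : Prop := ∀ (data : List (String × String)), Dom_format_ips data → Spec_format_ips data (format_ips data)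

-- ===== LEMMAS AND PROOFS =====

-- the common normal form: one output block per key, firsts drawn by filtering l
def pvBlk (l : List (String × String)) (k : String) : List String :=
  ("Flow: " ++ k) ::
    (PySem.List.sorted (PySem.Set.ofList ((l.filter (fun it => it.2 == k)).map (·.1))) (fun y => y) false).map (fun s => " -" ++ s)

theorem pv_sortedSet_perm (xs ys : List String) (h : xs.Perm ys) :
    PySem.List.sorted (PySem.Set.ofList xs) (fun y => y) false
      = PySem.List.sorted (PySem.Set.ofList ys) (fun y => y) false := by
  have hperm : (PySem.Set.ofList xs).Perm (PySem.Set.ofList ys) := by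
    apply List.perm_of_nodup_nodup_toFinset_eq (PySem.Set.nodup_ofList xs) (PySem.Set.nodup_ofList ys)
    ext a
    simp [List.mem_toFinset, PySem.Set.mem_ofList, h.mem_iff]
  have hz := PySem.List.sorted_ofList_pairwise_lt xs
  have hzp : (PySem.List.sorted (PySem.Set.ofList xs) (fun y => y) false).Perm (PySem.Set.ofList ys) :=
    (PySem.List.sorted_perm _ _ _).trans hperm
  symm
  exact PySem.List.sorted_eq_of_perm_of_pairwise_lt _ _ _ hzp hz

theorem pv_update_cons_not_mem (ms : List String) (s : List String) (k : String)
    (h : ∀ m ∈ ms, m ≠ k) :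
    PySem.Set.update (k :: s) ms = k :: PySem.Set.update s ms := by
  induction ms generalizing s with
  | nil => rfl
  | cons m ms ih =>
    have hmk : m ≠ k := h m (by simp)
    have hadd : PySem.Set.add (k :: s) m = k :: PySem.Set.add s m := by
      simp only [PySem.Set.add, PySem.Set.contains, List.contains_cons]
      have : (m == k) = false := by simp [hmk]
      simp only [this, Bool.false_or]
      split_ifs <;> simp
    simp only [PySem.Set.update, List.foldl_cons] at *
    rw [hadd, ih _ (fun m hm => h m (by simp [hm]))]

theorem pv_update_const (ms : List String) (s : PySem.Set String)
    (h : ∀ m ∈ ms, s.contains m = true) : PySem.Set.update s ms = s := by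
  induction ms with
  | nil => rfl
  | cons m ms ih =>
    simp only [PySem.Set.update, List.foldl_cons] at *
    have : PySem.Set.add s m = s := by unfold PySem.Set.add; rw [if_pos (h m (by simp))]
    rw [this]
    exact ih (fun m hm => h m (by simp [hm]))

theorem pv_ofList_sublist (xs : List String) : (PySem.Set.ofList xs).Sublist xs := by
  have key : ∀ (xs : List String) (s : List String), (PySem.Set.update s xs).Sublist (s ++ xs) := by
    intro xs
    induction xs with
    | nil => intro s; simp [PySem.Set.update]
    | cons x xs ih =>
      intro s
      simp only [PySem.Set.update, List.foldl_cons]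
      by_cases hc : PySem.Set.contains s x = true
      · have : PySem.Set.add s x = s := by unfold PySem.Set.add; rw [if_pos hc]
        rw [this]
        exact (ih s).trans (List.Sublist.append_left (List.sublist_cons_self _ _) s)
      · have : PySem.Set.add s x = s ++ [x] := by unfold PySem.Set.add; rw [if_neg hc]
        rw [this]
        have := ih (s ++ [x])
        simpa using this
  simpa [PySem.Set.ofList, PySem.Set.update] using key xs []

theorem pv_ofList_append (as bs : List String) :
    PySem.Set.ofList (as ++ bs) = PySem.Set.update (PySem.Set.ofList as) bs := by
  simp [PySem.Set.ofList, PySem.Set.update, List.foldl_append]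

theorem pv_drop_keys_ne (k : String) :
    ∀ (ys : List (String × String)), ys.Pairwise (fun a b => a.2 ≤ b.2) →
    (∀ it ∈ ys, k ≤ it.2) →
    ∀ it ∈ ys.dropWhile (fun it => it.2 == k), it.2 ≠ k := by
  intro ys
  induction ys with
  | nil => intro _ _ it hit; simp [List.dropWhile] at hit
  | cons y t ih =>
    intro hp hle it hit
    by_cases hy : y.2 = k
    · rw [List.dropWhile_cons_of_pos (by simp [hy])] at hit
      exact ih hp.of_cons (fun it h => hle it (by simp [h])) it hit
    · rw [List.dropWhile_cons_of_neg (by simp [hy])] at hit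
      have hky : k < y.2 := lt_of_le_of_ne (hle y (by simp)) (Ne.symm hy)
      rcases List.mem_cons.mp hit with h | h
      · subst h; exact hy
      · have : y.2 ≤ it.2 := (List.pairwise_cons.mp hp).1 it h
        exact fun hc => absurd (hc ▸ this) (not_le.mpr hky)

theorem pv_getD_groups_aux (data : List (String × String)) (k : String) :
    ∀ (d : PySem.Dict String (PySem.Set String)),
    ((data.foldl (fun d it => d.modify it.2 PySem.Set.empty (fun s => PySem.Set.add s it.1)) d).getD k PySem.Set.empty)
      = PySem.Set.update (d.getD k PySem.Set.empty) ((data.filter (fun it => it.2 == k)).map (·.1)) := by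
  induction data with
  | nil => intro d; rfl
  | cons it t ih =>
    intro d
    simp only [List.foldl_cons]
    rw [ih]
    by_cases hk : it.2 = k
    · subst hk
      rw [PySem.Dict.getD_modify]
      simp [PySem.Set.update]
    · rw [PySem.Dict.getD_modify]
      have : (it.2 == k) = false := by simp [hk]
      simp [Ne.symm hk, this]

theorem pv_groupA_norm (l : List (String × String))
    (h : l.Pairwise (fun a b => a.2 ≤ b.2)) :
    pvGroupA l = (PySem.Set.ofList (l.map (·.2))).flatMap (pvBlk l) := by
  induction l using pvGroupA.induct with
  | case1 => rw [pvGroupA]; rfl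
  | case2 x xs ih =>
    set p : String × String → Bool := fun it => it.2 == x.2 with hp
    set run := (x :: xs).takeWhile p with hrun_def
    set rest := (x :: xs).dropWhile p with hrest_def
    have hpx : p x = true := by simp [hp]
    have hrest_xs : rest = xs.dropWhile p := by rw [hrest_def, List.dropWhile_cons_of_pos hpx]
    have hrun_keys : ∀ it ∈ run, it.2 = x.2 := by
      intro it hit
      have := List.mem_takeWhile_imp hit
      simpa [hp] using this
    have hrest_ne : ∀ it ∈ rest, it.2 ≠ x.2 := by
      rw [hrest_xs]
      exact pv_drop_keys_ne x.2 xs h.of_cons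
        (fun it hit => (List.pairwise_cons.mp h).1 it hit)
    have hsplit : run ++ rest = x :: xs := List.takeWhile_append_dropWhile
    have hrest_pw : rest.Pairwise (fun a b => a.2 ≤ b.2) :=
      List.Pairwise.sublist (List.dropWhile_sublist p) h
    -- keys decomposition
    have hofk : PySem.Set.ofList ((x :: xs).map (·.2)) = x.2 :: PySem.Set.ofList (rest.map (·.2)) := by
      have hmap : (x :: xs).map (·.2) = run.map (·.2) ++ rest.map (·.2) := by
        rw [← List.map_append, hsplit]
      rw [hmap, pv_ofList_append]
      have hrunx : run = x :: xs.takeWhile p := by rw [hrun_def, List.takeWhile_cons_of_pos hpx]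
      have hof_run : PySem.Set.ofList (run.map (·.2)) = [x.2] := by
        rw [hrunx]
        have : PySem.Set.ofList ((x :: xs.takeWhile p).map (·.2))
            = PySem.Set.update [x.2] ((xs.takeWhile p).map (·.2)) := by
          simp [PySem.Set.ofList, PySem.Set.update, PySem.Set.add, PySem.Set.contains]
        rw [this]
        apply pv_update_const
        intro m hm
        rcases List.mem_map.mp hm with ⟨it, hit, rfl⟩
        have : it.2 = x.2 := by
          have := List.mem_takeWhile_imp hit
          simpa [hp] using this
        simp [PySem.Set.contains, this]
      rw [hof_run]
      have : PySem.Set.update [x.2] (rest.map (·.2))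
          = x.2 :: PySem.Set.update [] (rest.map (·.2)) := by
        apply pv_update_cons_not_mem
        intro m hm
        rcases List.mem_map.mp hm with ⟨it, hit, rfl⟩
        exact hrest_ne it hit
      rw [this]; rfl
    -- filters
    have hfilter_k : (x :: xs).filter (fun it => it.2 == x.2) = run := by
      rw [← hsplit, List.filter_append]
      have h1 : run.filter (fun it => it.2 == x.2) = run :=
        List.filter_eq_self.mpr (fun it hit => by simp [hrun_keys it hit])
      have h2 : rest.filter (fun it => it.2 == x.2) = [] :=
        List.filter_eq_nil_iff.mpr (fun it hit => by simp [hrest_ne it hit])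
      rw [h1, h2, List.append_nil]
    have hfilter_k' : ∀ k', k' ≠ x.2 →
        (x :: xs).filter (fun it => it.2 == k') = rest.filter (fun it => it.2 == k') := by
      intro k' hk'
      rw [← hsplit, List.filter_append]
      have h1 : run.filter (fun it => it.2 == k') = [] :=
        List.filter_eq_nil_iff.mpr (fun it hit => by simp [hrun_keys it hit, Ne.symm hk'])
      rw [h1, List.nil_append]
    -- assemble
    rw [pvGroupA]
    rw [ih hrest_pw]
    rw [hofk, List.flatMap_cons]
    congr 1
    · simp only [pvBlk, hfilter_k]
      rfl
    · apply List.flatMap_congr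
      intro k' hk'
      have hk'ne : k' ≠ x.2 := by
        rcases List.mem_map.mp ((PySem.Set.mem_ofList _ _).mp hk') with ⟨it, hit, rfl⟩
        exact hrest_ne it hit
      simp only [pvBlk, hfilter_k' k' hk'ne]

theorem pv_alt_norm (data : List (String × String)) :
    format_ips_alt data
      = PySem.Str.join "\n"
          ((PySem.List.sorted (PySem.Set.ofList (data.map (·.2))) (fun k => k) false).flatMap (pvBlk data)) := by
  unfold format_ips_alt
  have hkeys : (data.foldl (fun d it => d.modify it.2 PySem.Set.empty (fun s => PySem.Set.add s it.1)) PySem.Dict.empty).keys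
      = PySem.Set.ofList (data.map (·.2)) := by
    rw [PySem.Dict.keys_foldl_modify_key data (fun it => it.2) PySem.Set.empty (fun _ it s => PySem.Set.add s it.1) PySem.Dict.empty]
    rfl
  have hgetD : ∀ k, ((data.foldl (fun d it => d.modify it.2 PySem.Set.empty (fun s => PySem.Set.add s it.1)) PySem.Dict.empty).getD k PySem.Set.empty)
      = PySem.Set.ofList ((data.filter (fun it => it.2 == k)).map (·.1)) := by
    intro k; rw [pv_getD_groups_aux]; rfl
  simp only [hkeys, hgetD]
  congr 1
  have hfun : (fun (res : List String) (k : String) =>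
        (res ++ ["Flow: " ++ k]) ++
          (PySem.List.sorted (PySem.Set.ofList ((data.filter (fun it => it.2 == k)).map (·.1))) (fun y => y) false).map (fun x => " -" ++ x))
      = (fun res k => res ++ pvBlk data k) := by
    funext res k
    simp [pvBlk]
  rw [hfun, PySem.List.foldl_append_eq_flatMap]
  rfl

theorem pv_final (data : List (String × String)) : format_ips data = format_ips_alt data := by
  unfold format_ips
  set l := PySem.List.sorted data (fun it => it.2) false with hl
  have hperm : l.Perm data := PySem.List.sorted_perm data (fun it => it.2) false
  have hpw : l.Pairwise (fun a b => a.2 ≤ b.2) := PySem.List.sorted_pairwise data (fun it => it.2)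
  rw [pv_groupA_norm l hpw, pv_alt_norm]
  congr 1
  -- keys list equality
  have hkeys : PySem.List.sorted (PySem.Set.ofList (data.map (·.2))) (fun k => k) false
      = PySem.Set.ofList (l.map (·.2)) := by
    apply PySem.List.sorted_eq_of_perm_of_pairwise_lt
    · apply List.perm_of_nodup_nodup_toFinset_eq (PySem.Set.nodup_ofList _) (PySem.Set.nodup_ofList _)
      ext a
      simp [PySem.Set.mem_ofList, (hperm.map (·.2)).mem_iff]
    · have hsub := pv_ofList_sublist (l.map (·.2))
      have hle : (l.map (·.2)).Pairwise (fun a b => a ≤ b) := List.pairwise_map.mpr hpw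
      have hne : (PySem.Set.ofList (l.map (·.2))).Pairwise (fun a b => a ≠ b) :=
        PySem.Set.nodup_ofList _
      have hle' := List.Pairwise.sublist hsub hle
      exact (hne.and hle').imp (fun h => lt_of_le_of_ne h.2 h.1)
  rw [hkeys]
  apply List.flatMap_congr
  intro k _
  have hfp : ((l.filter (fun it => it.2 == k)).map (·.1)).Perm ((data.filter (fun it => it.2 == k)).map (·.1)) :=
    (hperm.filter _).map _
  simp only [pvBlk, pv_sortedSet_perm _ _ hfp]

-- ===== VERDICT (by name: the statement is the Claim_ definition above) =====
theorem format_ips_spec : Claim_equal_format_ips := by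
  intro data _
  unfold Spec_format_ips
  exact pv_final data
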